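-- pv_equiv track=rewrite | github.com/lvaughn/advent | 2017/24/chain.py | find_strongest
-- ===== SOURCE A (Python) =====
-- def find_strongest(start_val, links):
--     best_so_far = 0
--     for link in links:
--         if link[0] == start_val:
--             new_links = set(links)
--             new_links.remove(link)
--             best = find_strongest(link[1], new_links) + link[0] + link[1]
--             best_so_far = max(best, best_so_far)
--         if link[1] == start_val:
--             new_links = set(links)
--             new_links.remove(link)
--             best = find_strongest(link[0], new_links) + link[0] + link[1]
--             best_so_far = max(best, best_so_far)
--     return best_so_far
-- ===== SOURCE B (Python) =====
-- def find_strongest(start_val, links):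
--     # Build a port -> links adjacency index once, then DFS with a used-set.
--     adj = {}
--     for link in set(links):
--         a, b = link
--         adj[a] = adj.get(a, []) + [link]
--         if b != a:
--             adj[b] = adj.get(b, []) + [link]
--
--     def dfs(port, used):
--         best = 0
--         for link in adj.get(port, []):
--             if link not in used:
--                 a, b = link
--                 other = b if a == port else a
--                 best = max(best, a + b + dfs(other, used | {link}))
--         return best
--
--     return dfs(start_val, frozenset())
-- ===== Notes on version B (the rewrite author's own statement) =====
-- stated objective: alternative
-- what changed: B builds a port->links adjacency index once and runs a DFS over it with an immutable used-set, scanning only links adjacent to the current port, instead of A's rescanning and re-copying the whole remaining link set at every recursive call.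
import Mathlib
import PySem

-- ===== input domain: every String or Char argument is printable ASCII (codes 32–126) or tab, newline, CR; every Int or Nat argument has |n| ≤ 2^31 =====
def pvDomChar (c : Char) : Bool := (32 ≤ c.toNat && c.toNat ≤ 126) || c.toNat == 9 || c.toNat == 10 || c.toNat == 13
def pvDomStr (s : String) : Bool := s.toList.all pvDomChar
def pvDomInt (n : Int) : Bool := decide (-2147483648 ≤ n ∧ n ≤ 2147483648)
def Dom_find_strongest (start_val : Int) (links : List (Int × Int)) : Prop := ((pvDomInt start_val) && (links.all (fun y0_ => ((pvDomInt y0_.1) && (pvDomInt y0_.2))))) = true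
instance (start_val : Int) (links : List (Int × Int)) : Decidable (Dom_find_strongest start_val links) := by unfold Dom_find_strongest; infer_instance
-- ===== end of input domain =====

-- B replaces A's per-call full rescan and set copy of the remaining links by a one-time
-- adjacency index plus a used-set DFS (objective: alternative algorithm, same result).

-- ===== PORT A =====
-- fuel = links.length + 1 is a totality guard only: each recursive call receives the
-- remaining link set minus one link, so the recursion depth never exhausts it.
def find_strongest_go : Nat → Int → List (Int × Int) → Int
  | 0, _, _ => 0
  | fuel+1, start_val, links =>
    links.foldl (fun best_so_far link =>
      let best_so_far :=
        if link.1 = start_val then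
          max (find_strongest_go fuel link.2 (((PySem.Set.ofList links).remove? link).getD []) + link.1 + link.2) best_so_far
        else best_so_far
      if link.2 = start_val then
        max (find_strongest_go fuel link.1 (((PySem.Set.ofList links).remove? link).getD []) + link.1 + link.2) best_so_far
      else best_so_far) 0

def find_strongest (start_val : Int) (links : List (Int × Int)) : Int :=
  find_strongest_go (links.length + 1) start_val links

-- ===== PORT B =====
-- adjacency index: port value -> list of links touching it (each link filed once per distinct endpoint)
def fsAdj (links : List (Int × Int)) : PySem.Dict Int (List (Int × Int)) :=
  (PySem.Set.ofList links).foldl (fun adj link =>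
    let adj := adj.insert link.1 (adj.getD link.1 [] ++ [link])
    if link.2 ≠ link.1 then adj.insert link.2 (adj.getD link.2 [] ++ [link]) else adj)
    PySem.Dict.empty

-- fuel = links.length + 1, same totality guard as in port A
def fsDfs (adj : PySem.Dict Int (List (Int × Int))) : Nat → Int → PySem.Set (Int × Int) → Int
  | 0, _, _ => 0
  | fuel+1, port, used =>
    (adj.getD port []).foldl (fun best link =>
      if ¬ link ∈ used then
        let other := if link.1 = port then link.2 else link.1
        max best (link.1 + link.2 + fsDfs adj fuel other (PySem.Set.add used link))
      else best) 0

def find_strongest_alt (start_val : Int) (links : List (Int × Int)) : Int :=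
  fsDfs (fsAdj links) (links.length + 1) start_val PySem.Set.empty

-- ===== PRECONDITION & SPEC =====
def Spec_find_strongest (start_val : Int) (links : List (Int × Int)) (out : Int) : Prop := out = find_strongest_alt start_val links
instance (start_val : Int) (links : List (Int × Int)) (out : Int) : Decidable (Spec_find_strongest start_val links out) := by unfold Spec_find_strongest; infer_instance

-- ===== CLAIM (what is proved, stated in full; the proofs are below) =====
def Claim_equal_find_strongest : Prop := ∀ (start_val : Int) (links : List (Int × Int)), Dom_find_strongest start_val links → Spec_find_strongest start_val links (find_strongest start_val links)

-- ===== LEMMAS AND PROOFS =====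

-- `fsM F xs` = max of 0 and F over xs (the value both loops compute over their candidate lists)
def fsM {α : Type} (F : α → Int) : List α → Int
  | [] => 0
  | x :: xs => max (F x) (fsM F xs)

theorem fsM_nonneg {α : Type} (F : α → Int) (xs : List α) : 0 ≤ fsM F xs := by
  induction xs with
  | nil => simp [fsM]
  | cons x xs ih => simp [fsM]; right; exact ih

theorem fsM_le_iff {α : Type} (F : α → Int) (xs : List α) (c : Int) :
    fsM F xs ≤ c ↔ 0 ≤ c ∧ ∀ x ∈ xs, F x ≤ c := by
  induction xs with
  | nil => simp [fsM]
  | cons x xs ih => simp [fsM, ih]; tauto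

theorem le_fsM_of_mem {α : Type} (F : α → Int) {xs : List α} {x : α} (hx : x ∈ xs) :
    F x ≤ fsM F xs := ((fsM_le_iff F xs (fsM F xs)).1 le_rfl).2 x hx

theorem fsM_congr {α : Type} (F G : α → Int) (xs ys : List α)
    (hmem : ∀ x, x ∈ xs ↔ x ∈ ys) (hval : ∀ x ∈ xs, F x = G x) :
    fsM F xs = fsM G ys := by
  apply le_antisymm
  · exact (fsM_le_iff F xs _).2 ⟨fsM_nonneg G ys, fun x hx => by
      rw [hval x hx]; exact le_fsM_of_mem G ((hmem x).1 hx)⟩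
  · exact (fsM_le_iff G ys _).2 ⟨fsM_nonneg F xs, fun y hy => by
      rw [← hval y ((hmem y).2 hy)]; exact le_fsM_of_mem F ((hmem y).2 hy)⟩

theorem foldl_max_filter {α : Type} (F : α → Int) (P : α → Prop) [DecidablePred P] (xs : List α) :
    ∀ b : Int, 0 ≤ b →
      xs.foldl (fun best x => if P x then max (F x) best else best) b
        = max b (fsM F (xs.filter (fun x => decide (P x)))) := by
  induction xs with
  | nil => intro b hb; simp [fsM]; omega
  | cons x xs ih =>
    intro b hb
    simp only [List.foldl_cons, List.filter_cons]
    by_cases hp : P x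
    · rw [if_pos hp, if_pos (by simpa using hp), ih (max (F x) b) (by omega)]
      simp [fsM]
      omega
    · rw [if_neg hp, if_neg (by simpa using hp), ih b hb]

-- A's per-link step collapsed to one conditional max
theorem stepA_eq (start_val : Int) (links : List (Int × Int)) (fuel : Nat)
    (best : Int) (link : Int × Int) :
    (let b1 := if link.1 = start_val then
        max (find_strongest_go fuel link.2 (((PySem.Set.ofList links).remove? link).getD []) + link.1 + link.2) best
      else best
     if link.2 = start_val then
        max (find_strongest_go fuel link.1 (((PySem.Set.ofList links).remove? link).getD []) + link.1 + link.2) b1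
      else b1)
    = if (link.1 = start_val ∨ link.2 = start_val) then
        max (find_strongest_go fuel (if link.1 = start_val then link.2 else link.1)
              (((PySem.Set.ofList links).remove? link).getD []) + link.1 + link.2) best
      else best := by
  by_cases h1 : link.1 = start_val <;> by_cases h2 : link.2 = start_val
  · have h12 : link.2 = link.1 := by rw [h1, h2]
    simp only [h12, h1, if_pos, or_self]
    omega
  · simp [h1, h2]
  · simp [h1, h2]
  · simp [h1, h2]

-- one step of the adjacency-building loop, at the level of getD-membership
theorem mem_fsAdj_step (d : PySem.Dict Int (List (Int × Int))) (x : Int × Int) (p : Int) (l : Int × Int) :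
    l ∈ ((let d1 := d.insert x.1 (d.getD x.1 [] ++ [x])
          if x.2 ≠ x.1 then d1.insert x.2 (d1.getD x.2 [] ++ [x]) else d1).getD p [])
      ↔ l ∈ d.getD p [] ∨ (l = x ∧ (x.1 = p ∨ x.2 = p)) := by
  by_cases hx : x.2 = x.1
  · rw [if_neg (by simp [hx])]
    rw [PySem.Dict.getD_insert]
    by_cases hp : p = x.1
    · rw [if_pos hp]
      simp only [List.mem_append, List.mem_singleton]
      constructor
      · rintro (h | rfl)
        · exact Or.inl (hp ▸ h)
        · exact Or.inr ⟨rfl, Or.inl hp.symm⟩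
      · rintro (h | ⟨rfl, _⟩)
        · exact Or.inl (hp ▸ h)
        · exact Or.inr rfl
    · rw [if_neg hp]
      constructor
      · exact Or.inl
      · rintro (h | ⟨rfl, (h | h)⟩)
        · exact h
        · exact absurd h.symm hp
        · exact absurd (hx ▸ h).symm hp
  · rw [if_pos hx]
    rw [PySem.Dict.getD_insert]
    by_cases hp2 : p = x.2
    · rw [if_pos hp2, PySem.Dict.getD_insert, if_neg (by rw [← hp2]; exact fun h => hx (hp2 ▸ h.symm ▸ rfl))]
      simp only [List.mem_append, List.mem_singleton]
      constructor
      · rintro (h | rfl)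
        · exact Or.inl (hp2 ▸ h)
        · exact Or.inr ⟨rfl, Or.inr hp2.symm⟩
      · rintro (h | ⟨rfl, _⟩)
        · exact Or.inl (hp2 ▸ h)
        · exact Or.inr rfl
    · rw [if_neg hp2, PySem.Dict.getD_insert]
      by_cases hp1 : p = x.1
      · rw [if_pos hp1]
        simp only [List.mem_append, List.mem_singleton]
        constructor
        · rintro (h | rfl)
          · exact Or.inl (hp1 ▸ h)
          · exact Or.inr ⟨rfl, Or.inl hp1.symm⟩
        · rintro (h | ⟨rfl, _⟩)
          · exact Or.inl (hp1 ▸ h)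
          · exact Or.inr rfl
      · rw [if_neg hp1]
        constructor
        · exact Or.inl
        · rintro (h | ⟨rfl, (h | h)⟩)
          · exact h
          · exact absurd h.symm hp1
          · exact absurd h.symm hp2

-- membership in the adjacency index built by the fold
theorem mem_fsAdj_fold (xs : List (Int × Int)) :
    ∀ (d : PySem.Dict Int (List (Int × Int))) (p : Int) (l : Int × Int),
      l ∈ (xs.foldl (fun adj link =>
            let adj := adj.insert link.1 (adj.getD link.1 [] ++ [link])
            if link.2 ≠ link.1 then adj.insert link.2 (adj.getD link.2 [] ++ [link]) else adj) d).getD p []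
      ↔ l ∈ d.getD p [] ∨ (l ∈ xs ∧ (l.1 = p ∨ l.2 = p)) := by
  induction xs with
  | nil => simp
  | cons x xs ih =>
    intro d p l
    rw [List.foldl_cons, ih, mem_fsAdj_step]
    simp only [List.mem_cons]
    constructor
    · rintro ((h | ⟨rfl, h⟩) | ⟨h1, h2⟩) <;> tauto
    · rintro (h | ⟨(rfl | h1), h2⟩) <;> tauto

theorem mem_fsAdj (links : List (Int × Int)) (p : Int) (l : Int × Int) :
    l ∈ (fsAdj links).getD p [] ↔ l ∈ links ∧ (l.1 = p ∨ l.2 = p) := by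
  unfold fsAdj
  rw [mem_fsAdj_fold]
  simp [PySem.Set.mem_ofList, PySem.Dict.getD_empty]

-- main induction: A on the remaining link set = B on the adjacency index with a used set,
-- whenever the two states describe the same collection of available links
theorem fs_main (links : List (Int × Int)) :
    ∀ (fuel : Nat) (port : Int) (rem : List (Int × Int)) (used : PySem.Set (Int × Int)),
      (∀ l, l ∈ rem ↔ (l ∈ links ∧ ¬ l ∈ used)) →
      find_strongest_go fuel port rem = fsDfs (fsAdj links) fuel port used := by
  intro fuel
  induction fuel with
  | zero => intro port rem used _; rfl
  | succ fuel ih =>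
    intro port rem used hinv
    rw [show find_strongest_go (fuel+1) port rem = rem.foldl (fun best link =>
        if (link.1 = port ∨ link.2 = port) then
          max (find_strongest_go fuel (if link.1 = port then link.2 else link.1)
                (((PySem.Set.ofList rem).remove? link).getD []) + link.1 + link.2) best
        else best) 0 from by
      rw [find_strongest_go]
      congr 1
      funext best link
      exact stepA_eq port rem fuel best link]
    rw [show fsDfs (fsAdj links) (fuel+1) port used = ((fsAdj links).getD port []).foldl (fun best link =>
        if ¬ link ∈ used then
          max (link.1 + link.2 + fsDfs (fsAdj links) fuel (if link.1 = port then link.2 else link.1) (PySem.Set.add used link)) best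
        else best) 0 from by
      rw [fsDfs]
      congr 1
      funext best link
      by_cases h : link ∈ used
      · simp [h]
      · simp only [h, not_false_iff, if_pos]
        exact max_comm _ _]
    rw [foldl_max_filter _ _ _ 0 le_rfl, foldl_max_filter _ _ _ 0 le_rfl]
    congr 1
    apply fsM_congr
    · -- same candidate links on both sides
      intro l
      simp only [List.mem_filter, decide_eq_true_eq, mem_fsAdj, hinv l]
      tauto
    · -- same value for each candidate link
      intro l hl
      rw [List.mem_filter] at hl
      obtain ⟨hlrem, hlmatch⟩ := hl
      have hlset : l ∈ PySem.Set.ofList rem := (PySem.Set.mem_ofList _ _).2 hlrem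
      rw [PySem.Set.remove?_of_mem hlset, Option.getD_some]
      have herase : ∀ l', l' ∈ (PySem.Set.ofList rem).discard l ↔ (l' ∈ links ∧ ¬ l' ∈ PySem.Set.add used l) := by
        intro l'
        rw [PySem.Set.mem_discard, PySem.Set.mem_ofList, hinv l', PySem.Set.mem_add]
        tauto
      rw [ih (if l.1 = port then l.2 else l.1) _ (PySem.Set.add used l) herase]
      omega

-- ===== VERDICT (by name: the statement is the Claim_ definition above) =====
theorem find_strongest_spec : Claim_equal_find_strongest := by
  intro start_val links _
  unfold Spec_find_strongest find_strongest find_strongest_alt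
  exact fs_main links _ start_val links PySem.Set.empty (by simp [PySem.Set.empty])
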